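-- pv_equiv track=rewrite | github.com/limsarang/Programming-python- | module.package/비번 맞추기 2.py | check
-- ===== SOURCE A (Python) =====
-- def check(guess, answer):
--     strike = 0
--     ball = 0
--     #숫자 하나 꺼내서 정답에 있고 자리가 같으면 strike += 1
--     #숫자 하나 꺼내서 정답에 있고 자리가 다르면 ball += 1
--     for i, g in enumerate(guess):
--         for j, b in enumerate(answer):
--             if guess[i] == answer[j]:
--                 strike += 1
--             else:
--                 ball += 1
--     return strike, ball
-- ===== SOURCE B (Python) =====
-- def check(guess, answer):
--     freq = {}
--     for g in guess:
--         freq[g] = freq.get(g, 0) + 1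
--     strike = 0
--     for b in answer:
--         strike += freq.get(b, 0)
--     return strike, len(guess) * len(answer) - strike
-- ===== Notes on version B (the rewrite author's own statement) =====
-- stated objective: faster
-- what changed: Replaced the nested pair-by-pair loop with a frequency dictionary over guess: strike is the sum of guess-counts of each answer value and ball is len(guess)*len(answer) minus strike, removing the inner scan.
import Mathlib
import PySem

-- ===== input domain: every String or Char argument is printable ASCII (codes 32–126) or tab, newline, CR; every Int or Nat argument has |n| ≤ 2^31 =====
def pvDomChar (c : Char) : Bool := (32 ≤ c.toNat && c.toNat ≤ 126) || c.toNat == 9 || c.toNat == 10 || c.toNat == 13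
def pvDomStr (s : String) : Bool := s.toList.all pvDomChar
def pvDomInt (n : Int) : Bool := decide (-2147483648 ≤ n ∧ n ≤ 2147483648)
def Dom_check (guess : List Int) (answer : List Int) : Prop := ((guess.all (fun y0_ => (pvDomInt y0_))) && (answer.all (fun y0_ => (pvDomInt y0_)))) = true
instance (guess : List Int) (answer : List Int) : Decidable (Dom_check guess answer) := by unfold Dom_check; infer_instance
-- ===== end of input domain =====

-- B replaces A's nested pair-by-pair loop with a frequency dictionary over guess
-- (strike = sum of counts, ball = n*m - strike): asymptotically faster.


-- ===== PORT A =====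
def check (guess : List Int) (answer : List Int) : Int × Int :=
  (PySem.List.enumerate guess 0).foldl (fun st p =>
    (PySem.List.enumerate answer 0).foldl (fun st q =>
      if PySem.List.pyGet? guess p.1 = PySem.List.pyGet? answer q.1 then (st.1 + 1, st.2)
      else (st.1, st.2 + 1)) st) ((0 : Int), (0 : Int))

-- ===== PORT B =====
def check_alt (guess : List Int) (answer : List Int) : Int × Int :=
  let freq := guess.foldl (fun d g => d.insert g (d.getD g 0 + 1)) (PySem.Dict.empty : PySem.Dict Int Int)
  let strike := answer.foldl (fun s b => s + freq.getD b 0) (0 : Int)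
  (strike, (guess.length : Int) * (answer.length : Int) - strike)

-- ===== PRECONDITION & SPEC =====
def Spec_check (guess : List Int) (answer : List Int) (out : Int × Int) : Prop := out = check_alt guess answer
instance (guess : List Int) (answer : List Int) (out : Int × Int) : Decidable (Spec_check guess answer out) := by unfold Spec_check; infer_instance

-- ===== CLAIM (what is proved, stated in full; the proofs are below) =====
def Claim_equal_check : Prop := ∀ (guess : List Int) (answer : List Int), Dom_check guess answer → Spec_check guess answer (check guess answer)

-- ===== LEMMAS AND PROOFS =====

-- elements of enumerate index back to themselves
theorem pv_pyGet_enum {xs : List Int} {p : Int × Int} (h : p ∈ PySem.List.enumerate xs 0) :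
    PySem.List.pyGet? xs p.1 = some p.2 := by
  rcases (PySem.List.mem_enumerate_iff _ _ _).1 h with ⟨k, hk, rfl⟩
  simp [hk]

-- a fold over enumerate with a function depending only on the element is a fold over the list
theorem pv_enum_elem {α : Type} (xs : List Int) (f : α → Int → α) (init : α) :
    (PySem.List.enumerate xs 0).foldl (fun st p => f st p.2) init = xs.foldl f init := by
  conv_rhs => rw [← PySem.List.map_snd_enumerate xs 0, List.foldl_map]

-- inner loop of A in closed form
theorem pv_inner (answer : List Int) (g : Int) :
    ∀ st : Int × Int,
      answer.foldl (fun st b => if g = b then (st.1 + 1, st.2) else (st.1, st.2 + 1)) st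
        = (st.1 + answer.count g, st.2 + ((answer.length : Int) - answer.count g)) := by
  induction answer with
  | nil => intro st; simp
  | cons b bs ih =>
    intro st
    by_cases hb : g = b
    · rw [List.foldl_cons, if_pos hb, ih]
      subst hb
      simp only [List.count_cons_self, List.length_cons, Prod.mk.injEq]
      constructor <;> push_cast <;> ring
    · rw [List.foldl_cons, if_neg hb, ih]
      simp only [List.count_cons_of_ne (fun h => hb h.symm), List.length_cons, Prod.mk.injEq]
      constructor <;> push_cast <;> ring

-- outer loop of A in closed form
theorem pv_outer (answer : List Int) (guess : List Int) :
    ∀ st : Int × Int,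
      guess.foldl (fun st g =>
        answer.foldl (fun st b => if g = b then (st.1 + 1, st.2) else (st.1, st.2 + 1)) st) st
      = (st.1 + (guess.map (fun g => (answer.count g : Int))).sum,
         st.2 + ((guess.length : Int) * (answer.length : Int)
                   - (guess.map (fun g => (answer.count g : Int))).sum)) := by
  induction guess with
  | nil => intro st; simp
  | cons g gs ih =>
    intro st
    rw [List.foldl_cons, pv_inner, ih]
    simp only [List.map_cons, List.sum_cons, List.length_cons, Prod.mk.injEq]
    constructor <;> push_cast <;> ring

-- summing a 0/1 indicator counts occurrences
theorem pv_sum_ind (l : List Int) (g : Int) :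
    (l.map (fun b => if b = g then (1 : Int) else 0)).sum = l.count g := by
  induction l with
  | nil => simp
  | cons b bs ih =>
    by_cases hb : b = g
    · subst hb; simp [ih, List.count_cons_self]; ring
    · simp [hb, ih, List.count_cons_of_ne (fun h => hb h)]

-- double-counting symmetry: Σ_{g∈l1} count l2 g = Σ_{b∈l2} count l1 b
theorem pv_count_symm (l1 l2 : List Int) :
    (l1.map (fun g => (l2.count g : Int))).sum = (l2.map (fun b => (l1.count b : Int))).sum := by
  induction l1 with
  | nil => simp
  | cons g gs ih =>
    simp only [List.map_cons, List.sum_cons, ih]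
    have hsplit : (l2.map (fun b => ((g :: gs).count b : Int))).sum
        = (l2.map (fun b => (gs.count b : Int))).sum
          + (l2.map (fun b => if b = g then (1 : Int) else 0)).sum := by
      rw [← List.sum_map_add]
      apply congrArg
      apply List.map_congr_left
      intro b _
      by_cases hb : b = g
      · subst hb; simp [List.count_cons_self]
      · simp [List.count_cons, hb]; exact fun h => hb h.symm
    rw [hsplit, pv_sum_ind]
    ring

theorem pv_check_closed (guess answer : List Int) :
    check guess answer
      = ((guess.map (fun g => (answer.count g : Int))).sum,
         (guess.length : Int) * (answer.length : Int)
           - (guess.map (fun g => (answer.count g : Int))).sum) := by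
  calc check guess answer
      = (PySem.List.enumerate guess 0).foldl (fun st p =>
          (PySem.List.enumerate answer 0).foldl (fun st q =>
            if p.2 = q.2 then (st.1 + 1, st.2) else (st.1, st.2 + 1)) st) ((0 : Int), (0 : Int)) := by
        unfold check
        apply PySem.List.foldl_congr_mem
        intro acc p hp
        apply PySem.List.foldl_congr_mem
        intro acc' q hq
        rw [pv_pyGet_enum hp, pv_pyGet_enum hq]
        simp
    _ = guess.foldl (fun st g =>
          (PySem.List.enumerate answer 0).foldl (fun st q =>
            if g = q.2 then (st.1 + 1, st.2) else (st.1, st.2 + 1)) st) ((0 : Int), (0 : Int)) :=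
        pv_enum_elem guess (fun st g =>
          (PySem.List.enumerate answer 0).foldl (fun st q =>
            if g = q.2 then (st.1 + 1, st.2) else (st.1, st.2 + 1)) st) ((0 : Int), (0 : Int))
    _ = guess.foldl (fun st g =>
          answer.foldl (fun st b =>
            if g = b then (st.1 + 1, st.2) else (st.1, st.2 + 1)) st) ((0 : Int), (0 : Int)) := by
        apply PySem.List.foldl_congr_mem
        intro acc g _
        exact pv_enum_elem answer (fun st b => if g = b then (st.1 + 1, st.2) else (st.1, st.2 + 1)) acc
    _ = _ := by rw [pv_outer]; simp

theorem pv_alt_closed (guess answer : List Int) :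
    check_alt guess answer
      = ((answer.map (fun b => (guess.count b : Int))).sum,
         (guess.length : Int) * (answer.length : Int)
           - (answer.map (fun b => (guess.count b : Int))).sum) := by
  have hfun : (fun (s b : Int) =>
        s + (guess.foldl (fun d g => d.insert g (d.getD g 0 + 1))
              (PySem.Dict.empty : PySem.Dict Int Int)).getD b 0)
      = fun s b => s + (guess.count b : Int) := by
    funext s b
    rw [PySem.Dict.getD_foldl_insert_add_one]
    simp
  unfold check_alt
  simp only [hfun, PySem.List.foldl_add]
  simp

-- ===== VERDICT (by name: the statement is the Claim_ definition above) =====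
theorem check_spec : Claim_equal_check := by
  intro guess answer _
  unfold Spec_check
  rw [pv_check_closed, pv_alt_closed, pv_count_symm]
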